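-- pv_equiv track=rewrite | github.com/sumithastir/Data-structure | day23-strange-equality.py | solve
-- ===== SOURCE A (Python) =====
-- def solve(A):
--     # Optimize Approach
--
--     X = 0
--     Y = 0
--     i = 0
--
--     while A > 0:
--         if (A & 1) == 0:
--             X = X | (1 << i)
--         A = A >> 1
--         i += 1
--     Y = 1 << i
--     return X ^ Y
-- ===== SOURCE B (Python) =====
-- def solve(A):
--     # Closed form: XOR A against an (n+1)-bit all-ones mask, where n = A.bit_length().
--     if A <= 0:
--         return 1
--     n = A.bit_length()
--     return ((1 << (n + 1)) - 1) ^ A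
-- ===== Notes on version B (the rewrite author's own statement) =====
-- stated objective: simpler
-- what changed: Replaced the bit-by-bit while loop accumulating flipped bits with a single closed-form XOR against an (A.bit_length()+1)-bit all-ones mask, with an explicit A <= 0 guard returning 1.
import Mathlib
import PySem

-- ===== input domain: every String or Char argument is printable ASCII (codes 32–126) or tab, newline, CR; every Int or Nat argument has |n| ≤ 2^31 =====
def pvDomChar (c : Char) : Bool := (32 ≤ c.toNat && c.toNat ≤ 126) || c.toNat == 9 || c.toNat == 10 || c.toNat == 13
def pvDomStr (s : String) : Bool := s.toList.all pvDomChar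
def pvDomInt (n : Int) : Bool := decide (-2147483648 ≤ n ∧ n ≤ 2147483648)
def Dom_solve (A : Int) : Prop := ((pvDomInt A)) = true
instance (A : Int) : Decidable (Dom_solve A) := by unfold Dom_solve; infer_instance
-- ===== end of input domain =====

-- B replaces A's bit-by-bit loop with a closed-form mask XOR; objective: simpler.

-- termination helper for the loop port (cited by decreasing_by)
theorem pvShiftHalf_lt (A : Int) (h : 0 < A) : (A >>> (1:Nat)).toNat < A.toNat := by
  simp [Int.shiftRight_eq_div_pow]; omega

-- ===== PORT A =====
def solveLoop (A X : Int) (i : Nat) : Int :=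
  if h : A > 0 then
    solveLoop (A >>> (1:Nat)) (if PySem.Int.band A 1 = 0 then PySem.Int.bor X ((1:Int) <<< i) else X) (i + 1)
  else
    PySem.Int.bxor X ((1:Int) <<< i)
termination_by A.toNat
decreasing_by exact pvShiftHalf_lt A h

def solve (A : Int) : Int := solveLoop A 0 0

-- ===== PORT B =====
def solve_alt (A : Int) : Int :=
  if A ≤ 0 then 1
  else PySem.Int.bxor ((1:Int) <<< (PySem.Int.bitLength A + 1) - 1) A

-- ===== PRECONDITION & SPEC =====
def Spec_solve (A : Int) (out : Int) : Prop := out = solve_alt A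
instance (A : Int) (out : Int) : Decidable (Spec_solve A out) := by unfold Spec_solve; infer_instance

-- ===== CLAIM (what is proved, stated in full; the proofs are below) =====
def Claim_equal_solve : Prop := ∀ (A : Int), Dom_solve A → Spec_solve A (solve A)

-- ===== LEMMAS AND PROOFS =====

-- x with all bits below i, XORed with the single bit 2^i: disjoint bits, so xor is addition
theorem pv_xor_two_pow (i : Nat) : ∀ x : Nat, x < 2 ^ i → x ^^^ 2 ^ i = x + 2 ^ i := by
  induction i with
  | zero => intro x hx; interval_cases x; decide
  | succ i ih =>
    intro x hx
    have hd : (x ^^^ 2 ^ (i + 1)) / 2 = x / 2 + 2 ^ i := by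
      rw [Nat.xor_div_two]
      have : 2 ^ (i + 1) / 2 = 2 ^ i := by omega
      rw [this]
      exact ih _ (by omega)
    have hm : (x ^^^ 2 ^ (i + 1)) % 2 = (x + 2 ^ (i + 1)) % 2 := by
      rw [Nat.xor_mod_two_eq]
    have h2 : 2 ^ (i+1) = 2 * 2 ^ i := by ring
    omega

-- disjoint bits: or equals xor
theorem pv_lor_eq_xor_two_pow (i : Nat) (x : Nat) (hx : x < 2 ^ i) :
    x ||| 2 ^ i = x ^^^ 2 ^ i := by
  apply Nat.eq_of_testBit_eq
  intro j
  rw [Nat.testBit_lor, Nat.testBit_xor]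
  by_cases hij : i = j
  · subst hij
    have : x.testBit i = false := Nat.testBit_lt_two_pow hx
    simp [this]
  · have : (2 ^ i).testBit j = false := by simp [hij]
    simp [this]

theorem pv_lor_two_pow (i : Nat) (x : Nat) (hx : x < 2 ^ i) : x ||| 2 ^ i = x + 2 ^ i := by
  rw [pv_lor_eq_xor_two_pow i x hx]; exact pv_xor_two_pow i x hx

-- XOR against the k-bit all-ones mask is subtraction from it
theorem pv_mask_xor (k : Nat) : ∀ a : Nat, a < 2 ^ k → (2 ^ k - 1) ^^^ a = 2 ^ k - 1 - a := by
  induction k with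
  | zero => intro a ha; interval_cases a; decide
  | succ k ih =>
    intro a ha
    have hd : ((2 ^ (k + 1) - 1) ^^^ a) / 2 = 2 ^ k - 1 - a / 2 := by
      rw [Nat.xor_div_two]
      have h1 : (2 ^ (k + 1) - 1) / 2 = 2 ^ k - 1 := by omega
      rw [h1]
      exact ih _ (by omega)
    have hm : ((2 ^ (k + 1) - 1) ^^^ a) % 2 = (2 ^ (k + 1) - 1 + a) % 2 := Nat.xor_mod_two_eq
    have h2 : 2 ^ (k + 1) = 2 * 2 ^ k := by ring
    omega

theorem pv_shiftL_one (k : Nat) : (1 : Int) <<< k = 2 ^ k := by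
  simp [Int.shiftLeft_eq]

theorem pv_shiftR_one (A : Int) : A >>> (1:Nat) = PySem.Int.floordiv A 2 := by
  simp [PySem.Int.floordiv, Int.shiftRight_eq_div_pow, Int.ediv_eq_fdiv]

-- the loop invariant: for 0 ≤ A and 0 ≤ X < 2^i,
-- solveLoop A X i = X + 2^i * (2^(bitLength A + 1) - 1 - A)
theorem pv_loop_eq (a : Nat) : ∀ (A X : Int) (i : Nat), A.toNat = a → 0 ≤ A →
    0 ≤ X → X < 2 ^ i →
    solveLoop A X i = X + 2 ^ i * ((2:Int) ^ (PySem.Int.bitLength A + 1) - 1 - A) := by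
  induction a using Nat.strong_induction_on with
  | _ a ih =>
    intro A X i hA hA0 hX0 hXi
    rw [solveLoop.eq_def]
    by_cases hpos : A > 0
    · rw [dif_pos hpos]
      have hdiv : A >>> (1:Nat) = PySem.Int.floordiv A 2 := pv_shiftR_one A
      have hfd : PySem.Int.floordiv A 2 = A / 2 := by
        simp [PySem.Int.floordiv, Int.ediv_eq_fdiv]
      have hlt : (A >>> (1:Nat)).toNat < a := hA ▸ pvShiftHalf_lt A hpos
      have hmod : PySem.Int.band A 1 = A % 2 := by
        rw [PySem.Int.band_one]; simp [PySem.Int.mod, Int.fmod_eq_emod]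
      have hbl : PySem.Int.bitLength A = PySem.Int.bitLength (A >>> (1:Nat)) + 1 := by
        rw [hdiv]; exact PySem.Int.bitLength_of_pos hpos
      set X' : Int := if PySem.Int.band A 1 = 0 then PySem.Int.bor X ((1:Int) <<< i) else X with hX'
      have hX'val : X' = X + (1 - A % 2) * 2 ^ i := by
        rw [hX', hmod]
        by_cases he : A % 2 = 0
        · rw [if_pos he, he, pv_shiftL_one]
          have hXc : X = ((X.toNat : Int)) := by omega
          have h2 : ((2:Int) ^ i) = ((2 ^ i : Nat) : Int) := by push_cast; ring
          rw [hXc, h2, PySem.Int.bor_natCast]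
          rw [pv_lor_two_pow i X.toNat (by omega)]
          push_cast; ring
        · have h1 : A % 2 = 1 := by omega
          rw [if_neg he, h1]
          ring
      have hrec := ih _ hlt (A >>> (1:Nat)) X' (i + 1) rfl (by rw [hdiv, hfd]; omega)
        (by rw [hX'val]
            have h1 : 0 ≤ A % 2 := Int.emod_nonneg A (by norm_num)
            have h2 : A % 2 < 2 := Int.emod_lt_of_pos A (by norm_num)
            nlinarith [pow_pos (by norm_num : (0:Int) < 2) i])
        (by rw [hX'val]; have h1 : 0 ≤ A % 2 := Int.emod_nonneg A (by norm_num)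
            have h2 : A % 2 < 2 := Int.emod_lt_of_pos A (by norm_num)
            have : (2:Int) ^ (i+1) = 2 * 2 ^ i := by ring
            nlinarith [pow_pos (by norm_num : (0:Int) < 2) i])
      rw [hrec, hX'val, hbl]
      have hsplit : A = 2 * (A / 2) + A % 2 := by omega
      have hAd : A >>> (1:Nat) = A / 2 := by rw [hdiv, hfd]
      rw [hAd]
      ring_nf
      have : (2:Int) ^ (PySem.Int.bitLength (A/2) + 1 + 1) = 2 * 2 ^ (PySem.Int.bitLength (A/2) + 1) := by ring
      nlinarith [this, hsplit]
    · -- A = 0 here (since 0 ≤ A)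
      have hz : A = 0 := by omega
      rw [dif_neg hpos]
      subst hz
      have hb0 : PySem.Int.bitLength (0:Int) = 0 := by decide
      rw [hb0, pv_shiftL_one]
      have hXc : X = ((X.toNat : Int)) := by omega
      have h2 : ((2:Int) ^ i) = ((2 ^ i : Nat) : Int) := by push_cast; ring
      rw [hXc, h2, PySem.Int.bxor_natCast]
      rw [pv_xor_two_pow i X.toNat (by omega)]
      push_cast; ring

-- ===== VERDICT (by name: the statement is the Claim_ definition above) =====
theorem solve_spec : Claim_equal_solve := by
  unfold Claim_equal_solve Spec_solve
  intro A _
  unfold solve solve_alt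
  by_cases hle : A ≤ 0
  · rw [if_pos hle, solveLoop.eq_def]
    have h : ¬ A > 0 := by omega
    rw [dif_neg h]
    decide
  · have hpos : 0 < A := by omega
    rw [if_neg hle]
    have hL := pv_loop_eq A.toNat A 0 0 rfl (by omega) (by omega) (by norm_num)
    rw [hL]
    set n := PySem.Int.bitLength A with hn
    have hAlt : A.toNat < 2 ^ (n + 1) := by
      have h1 : A.natAbs < 2 ^ n := PySem.Int.lt_two_pow_bitLength A
      have h2 : (2:Nat) ^ n ≤ 2 ^ (n+1) := Nat.pow_le_pow_right (by norm_num) (by omega)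
      have h3 : A.natAbs = A.toNat := by omega
      omega
    have hmask : (1:Int) <<< (n + 1) - 1 = (((2 ^ (n+1) - 1 : Nat)) : Int) := by
      rw [pv_shiftL_one]
      have : (1:Nat) ≤ 2 ^ (n+1) := Nat.one_le_two_pow
      push_cast [this]; ring
    have hAc : A = ((A.toNat : Int)) := by omega
    rw [hmask, hAc, PySem.Int.bxor_natCast]
    rw [pv_mask_xor (n + 1) A.toNat hAlt]
    have hc : (2:Int) ^ (n + 1) = (((2 ^ (n + 1) : Nat)) : Int) := by push_cast; ring
    rw [hc]
    have h1 : (1:Nat) ≤ 2 ^ (n+1) := Nat.one_le_two_pow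
    norm_num
    omega
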